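-- pv_equiv track=rewrite | github.com/michaelliudl/CodingInterviewPython | com/leetcode/DP/01639_h_number of ways to form a target string given a dictionary.py | numWaysTD
-- ===== SOURCE A (Python) =====
-- from typing import List, DefaultDict
-- import math, functools
--
-- def numWaysTD(words: list[str], target: str) -> int:
--
--     @functools.cache
--     def dp(i, j):   # Return # of ways to form target[i:n] using words[j:n]
--         if i == len(target):
--             return 1
--         if j == wordLen:
--             return 0
--         return (dp(i + 1, j + 1) * charCounts[j][target[i]] + dp(i, j + 1)) % kMode
--
--     kMode = 10 ** 9 + 7
--     wordLen = len(words[0])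
--     charCounts = [DefaultDict(int) for _ in range(wordLen)] # Count characters in each word
--     for word in words:
--         for i in range(wordLen):
--             charCounts[i][word[i]] += 1
--     return dp(0, 0)
-- ===== SOURCE B (Python) =====
-- def numWaysTD(words: list[str], target: str) -> int:
--     # Bottom-up 1D tabulation instead of memoized top-down recursion.
--     MOD = 10 ** 9 + 7
--     m = len(words[0])
--     n = len(target)
--     dp = [1] + [0] * n      # dp[i] = ways to form target[:i] from columns seen so far
--     for j in range(m):
--         col = {}
--         for w in words:
--             c = w[j]
--             col[c] = col.get(c, 0) + 1
--         dp = [1] + [(dp[i + 1] + dp[i] * col.get(target[i], 0)) % MOD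
--                     for i in range(n)]
--     return dp[n]
-- ===== Notes on version B (the rewrite author's own statement) =====
-- stated objective: alternative
-- what changed: Replaces A's memoized top-down recursion dp(i,j) over (target index, word position) by a bottom-up tabulation: a rolling 1D dp array over target prefixes, updated once per word position using a per-column character counter built with dict.get instead of nested defaultdict updates.
import Mathlib
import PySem

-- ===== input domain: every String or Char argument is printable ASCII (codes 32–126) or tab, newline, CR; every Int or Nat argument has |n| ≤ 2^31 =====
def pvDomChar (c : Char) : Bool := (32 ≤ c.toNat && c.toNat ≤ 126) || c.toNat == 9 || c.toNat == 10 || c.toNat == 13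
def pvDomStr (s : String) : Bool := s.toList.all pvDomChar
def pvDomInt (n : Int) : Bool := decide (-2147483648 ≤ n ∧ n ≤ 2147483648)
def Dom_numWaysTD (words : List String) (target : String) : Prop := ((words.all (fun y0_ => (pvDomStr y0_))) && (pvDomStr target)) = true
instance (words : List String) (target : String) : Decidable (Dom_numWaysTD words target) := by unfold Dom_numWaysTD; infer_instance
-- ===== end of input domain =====

-- B replaces A's memoized top-down recursion dp(i,j) by a bottom-up 1D tabulation over
-- word positions with per-column character counters; equal return value on Pre_ (alternative decomposition).

-- w[i] for a word; exact whenever i < w.length (guaranteed by Pre_ inside both loops)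
def pvCharAt (w : String) (i : Nat) : Char := w.toList.getD i ' '

-- ===== PORT A =====
-- dp(i, j) of A, written on the suffixes target[i:] and charCounts[j:]
def numWaysTDdp (ts : List Char) (cs : List (PySem.Dict Char Int)) : Int :=
  match ts, cs with
  | [], _ => 1
  | _ :: _, [] => 0
  | t :: ts', c :: cs' =>
      PySem.Int.mod (numWaysTDdp ts' cs' * PySem.Dict.getD c t 0 + numWaysTDdp (t :: ts') cs')
        1000000007

-- the charCounts-building double loop of A (charCounts[i][word[i]] += 1)
def numWaysTDbuild (words : List String) (wordLen : Nat) : List (PySem.Dict Char Int) :=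
  words.foldl (fun cc word =>
      (List.range wordLen).foldl (fun cc i =>
          cc.set i ((cc.getD i PySem.Dict.empty).modify (pvCharAt word i) 0 (· + 1))) cc)
    (List.replicate wordLen PySem.Dict.empty)

def numWaysTD (words : List String) (target : String) : Int :=
  let wordLen := (words.headD "").toList.length   -- len(words[0]); Pre_ gives words ≠ []
  numWaysTDdp target.toList (numWaysTDbuild words wordLen)

-- ===== PORT B =====
def numWaysTD_alt (words : List String) (target : String) : Int :=
  let M : Int := 1000000007
  let m := (words.headD "").toList.length
  let tl := target.toList
  let n := tl.length
  let dpFin := (List.range m).foldl (fun dp j =>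
      let col : PySem.Dict Char Int := words.foldl (fun d w =>
          let c := pvCharAt w j
          d.insert c (d.getD c 0 + 1)) PySem.Dict.empty
      1 :: (List.range n).map (fun i =>
          PySem.Int.mod (dp.getD (i + 1) 0 + dp.getD i 0 * col.getD (tl.getD i ' ') 0) M))
    (1 :: List.replicate n 0)
  dpFin.getD n 0

-- ===== PRECONDITION & SPEC =====
-- Pre_ excludes exactly the inputs where Python A raises IndexError: empty words
-- (words[0]) or some word shorter than words[0] (word[i] in the counting loop).
def Pre_numWaysTD (words : List String) (target : String) : Prop :=
  words ≠ [] ∧ ∀ w ∈ words, (words.headD "").toList.length ≤ w.toList.length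
instance (words : List String) (target : String) : Decidable (Pre_numWaysTD words target) := by
  unfold Pre_numWaysTD; infer_instance

def pvWitness_numWaysTD : List String × String := (["acca", "bbbb", "caca"], "aba")

def Spec_numWaysTD (words : List String) (target : String) (out : Int) : Prop := out = numWaysTD_alt words target
instance (words : List String) (target : String) (out : Int) : Decidable (Spec_numWaysTD words target out) := by unfold Spec_numWaysTD; infer_instance

-- ===== CLAIM (what is proved, stated in full; the proofs are below) =====
def Claim_equal_numWaysTD : Prop := ∀ (words : List String) (target : String), Dom_numWaysTD words target → Pre_numWaysTD words target → Spec_numWaysTD words target (numWaysTD words target)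

-- ===== LEMMAS AND PROOFS =====

-- the exact (un-reduced) count of ways to embed ts into the column list cs
def pvCnt (ts : List Char) (cs : List (PySem.Dict Char Int)) : Int :=
  match ts, cs with
  | [], _ => 1
  | _ :: _, [] => 0
  | t :: ts', c :: cs' => pvCnt ts' cs' * PySem.Dict.getD c t 0 + pvCnt (t :: ts') cs'

-- B's column counter for position j
def pvColB (words : List String) (j : Nat) : PySem.Dict Char Int :=
  words.foldl (fun d w => d.insert (pvCharAt w j) (d.getD (pvCharAt w j) 0 + 1)) PySem.Dict.empty

lemma pvMod_helper (a b k : Int) :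
    (a % 1000000007 * k + b % 1000000007) % 1000000007 = (a * k + b) % 1000000007 := by
  conv_rhs => rw [Int.add_emod, Int.mul_emod]
  conv_lhs => rw [Int.add_emod, Int.mul_emod, Int.emod_emod_of_dvd a dvd_rfl,
    Int.emod_emod_of_dvd b dvd_rfl]

lemma pvMod_helper' (a b k : Int) :
    (a % 1000000007 + b % 1000000007 * k) % 1000000007 = (a + b * k) % 1000000007 := by
  rw [add_comm, pvMod_helper, add_comm]

lemma pvCnt_nil (cs : List (PySem.Dict Char Int)) : pvCnt [] cs = 1 := by
  cases cs <;> rfl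

lemma pvCnt_ne_nil (ts : List Char) (h : ts ≠ []) : pvCnt ts [] = 0 := by
  cases ts with
  | nil => exact absurd rfl h
  | cons t ts' => rfl

lemma pvMod_eq (x : Int) : PySem.Int.mod x 1000000007 = x % 1000000007 :=
  PySem.Int.mod_eq_emod_of_pos (by norm_num)

lemma numWaysTDdp_eq (ts : List Char) (cs : List (PySem.Dict Char Int)) :
    numWaysTDdp ts cs = pvCnt ts cs % 1000000007 := by
  induction cs generalizing ts with
  | nil =>
    cases ts with
    | nil =>
      show (1 : Int) = pvCnt [] [] % 1000000007
      rw [pvCnt_nil]; decide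
    | cons t ts' =>
      show (0 : Int) = pvCnt (t :: ts') [] % 1000000007
      rw [pvCnt_ne_nil _ (by simp)]; decide
  | cons c cs' ih =>
    cases ts with
    | nil =>
      show (1 : Int) = pvCnt [] (c :: cs') % 1000000007
      rw [pvCnt_nil]; decide
    | cons t ts' =>
      show PySem.Int.mod (numWaysTDdp ts' cs' * PySem.Dict.getD c t 0 + numWaysTDdp (t :: ts') cs')
        1000000007 = _
      rw [pvMod_eq, ih ts', ih (t :: ts'), pvMod_helper]
      rfl

lemma pvCnt_append (cs : List (PySem.Dict Char Int)) :
    ∀ (ts₀ : List Char) (t : Char) (c : PySem.Dict Char Int),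
      pvCnt (ts₀ ++ [t]) (cs ++ [c]) = pvCnt (ts₀ ++ [t]) cs + pvCnt ts₀ cs * PySem.Dict.getD c t 0 := by
  induction cs with
  | nil =>
    intro ts₀ t c
    cases ts₀ with
    | nil =>
      show pvCnt [] [] * PySem.Dict.getD c t 0 + pvCnt [t] [] = pvCnt [t] [] + pvCnt [] [] * PySem.Dict.getD c t 0
      ring
    | cons u us =>
      show pvCnt (us ++ [t]) [] * PySem.Dict.getD c u 0 + pvCnt (u :: (us ++ [t])) [] = _
      rw [pvCnt_ne_nil _ (by simp), pvCnt_ne_nil (u :: (us ++ [t])) (by simp)]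
      show (0 : Int) * _ + 0 = pvCnt ((u :: us) ++ [t]) [] + pvCnt (u :: us) [] * PySem.Dict.getD c t 0
      rw [pvCnt_ne_nil _ (by simp), pvCnt_ne_nil _ (by simp)]
      ring
  | cons c0 cs' ih =>
    intro ts₀ t c
    cases ts₀ with
    | nil =>
      show pvCnt [] (cs' ++ [c]) * PySem.Dict.getD c0 t 0 + pvCnt [t] (cs' ++ [c])
        = pvCnt [t] (c0 :: cs') + pvCnt [] (c0 :: cs') * PySem.Dict.getD c t 0
      rw [pvCnt_nil, pvCnt_nil]
      have h := ih [] t c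
      simp only [List.nil_append] at h
      rw [h, pvCnt_nil]
      show _ = pvCnt [] cs' * PySem.Dict.getD c0 t 0 + pvCnt [t] cs' + 1 * PySem.Dict.getD c t 0
      rw [pvCnt_nil]
      ring
    | cons u us =>
      show pvCnt (us ++ [t]) (cs' ++ [c]) * PySem.Dict.getD c0 u 0 +
          pvCnt (u :: (us ++ [t])) (cs' ++ [c])
        = pvCnt ((u :: us) ++ [t]) (c0 :: cs') + pvCnt (u :: us) (c0 :: cs') * PySem.Dict.getD c t 0
      have h2 := ih (u :: us) t c
      simp only [List.cons_append] at h2 ⊢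
      rw [ih us t c, h2]
      show _ = (pvCnt (us ++ [t]) cs' * PySem.Dict.getD c0 u 0 + pvCnt (u :: (us ++ [t])) cs') +
        (pvCnt us cs' * PySem.Dict.getD c0 u 0 + pvCnt (u :: us) cs') * PySem.Dict.getD c t 0
      ring

-- the inner `for i in range(wordLen)` loop of A: effect on length and on one entry
lemma pvSetFold_length (w : String) (L : Nat) (cc : List (PySem.Dict Char Int)) :
    ((List.range L).foldl (fun cc i =>
        cc.set i ((cc.getD i PySem.Dict.empty).modify (pvCharAt w i) 0 (· + 1))) cc).length
      = cc.length := by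
  induction L generalizing cc with
  | zero => simp
  | succ L ih => rw [List.range_succ, List.foldl_append, List.foldl_cons, List.foldl_nil,
      List.length_set, ih]

lemma pvSetFold_getD (w : String) (L : Nat) (cc : List (PySem.Dict Char Int)) (j : Nat)
    (hj : j < cc.length) :
    ((List.range L).foldl (fun cc i =>
        cc.set i ((cc.getD i PySem.Dict.empty).modify (pvCharAt w i) 0 (· + 1))) cc).getD j
        PySem.Dict.empty
      = if j < L then (cc.getD j PySem.Dict.empty).modify (pvCharAt w j) 0 (· + 1)
        else cc.getD j PySem.Dict.empty := by
  induction L with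
  | zero => simp
  | succ L ih =>
    rw [List.range_succ, List.foldl_append, List.foldl_cons, List.foldl_nil]
    by_cases hjL : j = L
    · subst hjL
      rw [List.getD_eq_getElem?_getD, List.getElem?_set_self (by rw [pvSetFold_length]; exact hj),
        Option.getD_some, if_pos (Nat.lt_succ_self _), ih, if_neg (lt_irrefl _)]
    · rw [List.getD_eq_getElem?_getD, List.getElem?_set_ne (by omega),
        ← List.getD_eq_getElem?_getD, ih]
      by_cases h2 : j < L
      · rw [if_pos h2, if_pos (by omega)]
      · rw [if_neg h2, if_neg (by omega)]

lemma pvFoldWords_getD (L : Nat) (ws : List String) :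
    ∀ (cc : List (PySem.Dict Char Int)), cc.length = L → ∀ j, j < L →
      (ws.foldl (fun cc word =>
          (List.range L).foldl (fun cc i =>
            cc.set i ((cc.getD i PySem.Dict.empty).modify (pvCharAt word i) 0 (· + 1))) cc) cc).getD
            j PySem.Dict.empty
        = ws.foldl (fun d w => d.modify (pvCharAt w j) 0 (· + 1)) (cc.getD j PySem.Dict.empty) := by
  induction ws with
  | nil => intro cc hlen j hj; rfl
  | cons w ws ih =>
    intro cc hlen j hj
    rw [List.foldl_cons, List.foldl_cons]
    rw [ih _ (by rw [pvSetFold_length]; exact hlen) j hj]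
    rw [pvSetFold_getD w L cc j (by omega), if_pos hj]

lemma pvCol_eq (words : List String) (j : Nat) :
    words.foldl (fun d w => d.modify (pvCharAt w j) 0 (· + 1)) PySem.Dict.empty
      = pvColB words j := by
  have h1 : (words.map (fun w => pvCharAt w j)).foldl (fun d x => d.modify x 0 (· + 1))
      (PySem.Dict.empty : PySem.Dict Char Int)
      = words.foldl (fun d w => d.modify (pvCharAt w j) 0 (· + 1)) PySem.Dict.empty := by
    rw [List.foldl_map]
  have h2 : (words.map (fun w => pvCharAt w j)).foldl (fun d x => d.insert x (d.getD x 0 + 1))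
      PySem.Dict.empty = pvColB words j := by
    unfold pvColB; rw [List.foldl_map]
  calc words.foldl (fun d w => d.modify (pvCharAt w j) 0 (· + 1)) PySem.Dict.empty
      = (words.map (fun w => pvCharAt w j)).foldl (fun d x => d.modify x 0 (· + 1))
          (PySem.Dict.empty : PySem.Dict Char Int) := h1.symm
    _ = PySem.Dict.counter (words.map fun w => pvCharAt w j) :=
          (PySem.Dict.counter_eq_foldl _).symm
    _ = (words.map (fun w => pvCharAt w j)).foldl (fun d x => d.insert x (d.getD x 0 + 1))
          PySem.Dict.empty := (PySem.Dict.foldl_insert_getD_add_one_eq_counter _).symm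
    _ = pvColB words j := h2

lemma pvBuild_length (words : List String) (wordLen : Nat) :
    (numWaysTDbuild words wordLen).length = wordLen := by
  unfold numWaysTDbuild
  have h : ∀ (ws : List String) (cc : List (PySem.Dict Char Int)),
      (ws.foldl (fun cc word =>
        (List.range wordLen).foldl (fun cc i =>
          cc.set i ((cc.getD i PySem.Dict.empty).modify (pvCharAt word i) 0 (· + 1))) cc) cc).length
      = cc.length := by
    intro ws
    induction ws with
    | nil => intro cc; rfl
    | cons w ws ih => intro cc; rw [List.foldl_cons, ih, pvSetFold_length]
  rw [h, List.length_replicate]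

lemma pvBuild_eq_map (words : List String) (wordLen : Nat) :
    numWaysTDbuild words wordLen = (List.range wordLen).map (pvColB words) := by
  apply List.ext_getElem
  · rw [pvBuild_length, List.length_map, List.length_range]
  · intro j h1 h2
    rw [← List.getD_eq_getElem _ PySem.Dict.empty h1, ← List.getD_eq_getElem _ PySem.Dict.empty h2]
    have hj : j < wordLen := by rw [pvBuild_length] at h1; exact h1
    unfold numWaysTDbuild
    rw [pvFoldWords_getD wordLen words _ (List.length_replicate) j hj,
      List.getD_replicate (h := hj), pvCol_eq,
      List.getD_eq_getElem _ _ (by simpa using hj)]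
    simp

-- B's dp array after processing the column list cs
def pvVec (tl : List Char) (cs : List (PySem.Dict Char Int)) : List Int :=
  (List.range (tl.length + 1)).map (fun i => pvCnt (tl.take i) cs % 1000000007)

lemma pvGetD_map_range (f : Nat → Int) (n i : Nat) (h : i < n) :
    ((List.range n).map f).getD i 0 = f i := by
  rw [List.getD_eq_getElem _ _ (by simpa using h)]
  simp

lemma pvVec_nil (tl : List Char) : pvVec tl [] = 1 :: List.replicate tl.length 0 := by
  apply List.ext_getElem
  · simp [pvVec]
  · intro i h1 h2
    simp only [pvVec, List.length_map, List.length_range] at h1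
    simp only [pvVec, List.getElem_map, List.getElem_range]
    cases i with
    | zero =>
      rw [List.take_zero, pvCnt_nil, List.getElem_cons_zero]
      decide
    | succ k =>
      rw [pvCnt_ne_nil _ (by
          have hlen : (tl.take (k + 1)).length = k + 1 := by rw [List.length_take]; omega
          intro hnil; rw [hnil] at hlen; simp at hlen),
        List.getElem_cons_succ, List.getElem_replicate]
      decide

lemma pvStep (tl : List Char) (cs : List (PySem.Dict Char Int)) (col : PySem.Dict Char Int) :
    (1 : Int) :: (List.range tl.length).map (fun i =>
        PySem.Int.mod ((pvVec tl cs).getD (i + 1) 0 + (pvVec tl cs).getD i 0 *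
          PySem.Dict.getD col (tl.getD i ' ') 0) 1000000007)
      = pvVec tl (cs ++ [col]) := by
  apply List.ext_getElem
  · simp [pvVec]
  · intro i h1 h2
    simp only [List.length_cons, List.length_map, List.length_range] at h1
    simp only [pvVec, List.getElem_map, List.getElem_range]
    cases i with
    | zero =>
      rw [List.take_zero, pvCnt_nil, List.getElem_cons_zero]
      decide
    | succ k =>
      have hk : k < tl.length := by omega
      rw [List.getElem_cons_succ, List.getElem_map, List.getElem_range]
      rw [pvGetD_map_range _ _ _ (by omega), pvGetD_map_range _ _ _ (by omega)]
      rw [pvMod_eq, pvMod_helper']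
      have htake : tl.take (k + 1) = tl.take k ++ [tl[k]] := by
        rw [List.take_add_one, List.getElem?_eq_getElem hk]; rfl
      have hgetd : tl.getD k ' ' = tl[k] := List.getD_eq_getElem _ _ hk
      rw [htake, hgetd, pvCnt_append]

lemma pvFoldB (tl : List Char) (colf : Nat → PySem.Dict Char Int) (k : Nat) :
    (List.range k).foldl (fun dp j =>
        (1 : Int) :: (List.range tl.length).map (fun i =>
          PySem.Int.mod (dp.getD (i + 1) 0 + dp.getD i 0 *
            PySem.Dict.getD (colf j) (tl.getD i ' ') 0) 1000000007))
      (1 :: List.replicate tl.length 0)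
      = pvVec tl ((List.range k).map colf) := by
  induction k with
  | zero => rw [List.range_zero, List.foldl_nil, List.map_nil, pvVec_nil]
  | succ k ih =>
    rw [List.range_succ, List.foldl_append, List.foldl_cons, List.foldl_nil, ih,
      List.map_append, List.map_cons, List.map_nil, pvStep]

theorem numWaysTD_eq_alt (words : List String) (target : String) :
    numWaysTD words target = numWaysTD_alt words target := by
  have hA : numWaysTD words target
      = pvCnt target.toList (numWaysTDbuild words (words.headD "").toList.length) % 1000000007 :=
    numWaysTDdp_eq _ _
  have hB : numWaysTD_alt words target
      = ((List.range (words.headD "").toList.length).foldl (fun dp j =>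
            (1 : Int) :: (List.range target.toList.length).map (fun i =>
              PySem.Int.mod (dp.getD (i + 1) 0 + dp.getD i 0 *
                PySem.Dict.getD (pvColB words j) (target.toList.getD i ' ') 0) 1000000007))
          (1 :: List.replicate target.toList.length 0)).getD target.toList.length 0 := rfl
  rw [hA, hB, pvFoldB, pvBuild_eq_map]
  unfold pvVec
  rw [pvGetD_map_range _ _ _ (Nat.lt_succ_self _), List.take_length]

-- ===== VERDICT (by name: the statement is the Claim_ definition above) =====
theorem numWaysTD_spec : Claim_equal_numWaysTD := by
  intro words target _ _
  unfold Spec_numWaysTD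
  exact numWaysTD_eq_alt words target
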